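-- pv_equiv track=rewrite | github.com/MrBrantCode/unitest_baseline | mut_generate/mist_train_cf/cf_64281/solution.py | ways_to_fill
-- ===== SOURCE A (Python) =====
-- def ways_to_fill(length):
--     ways = [1, 1, 1, 1] + [0] * (length - 3)
--     for i in range(4, length + 1):
--         ways[i] += ways[i-1]
--         ways[i] += ways[i-4]
--         for j in range(0, i - 4):
--             ways[i] += ways[j]
--     return ways[length]
-- ===== SOURCE B (Python) =====
-- def ways_to_fill(length):
--     if length < 4:
--         return 1
--     ways = [1, 1, 1, 1]
--     prefix = 1  # sum(ways[0 : i - 3]) at the top of each iteration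
--     for i in range(4, length + 1):
--         ways.append(ways[-1] + prefix)
--         prefix += ways[i - 3]
--     return ways[length]
-- ===== Notes on version B (the rewrite author's own statement) =====
-- stated objective: faster
-- what changed: Replaces the quadratic table with inner re-summation by a single pass that maintains a running prefix sum of the already-computed ways, appending each new entry in O(1).
import Mathlib
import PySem

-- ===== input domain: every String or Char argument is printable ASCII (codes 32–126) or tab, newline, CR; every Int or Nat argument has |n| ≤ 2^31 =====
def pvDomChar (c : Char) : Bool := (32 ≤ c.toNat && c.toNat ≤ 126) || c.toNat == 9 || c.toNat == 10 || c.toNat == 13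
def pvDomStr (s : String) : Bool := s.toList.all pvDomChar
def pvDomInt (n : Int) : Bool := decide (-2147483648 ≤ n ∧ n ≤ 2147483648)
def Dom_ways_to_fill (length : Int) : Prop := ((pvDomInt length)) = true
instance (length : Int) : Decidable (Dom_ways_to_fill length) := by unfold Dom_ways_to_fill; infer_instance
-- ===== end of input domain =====

-- B replaces A's quadratic inner re-summation loop by a running prefix sum (O(n) in a timing run's asymptotic mechanism).

-- ===== PORT A =====
def ways_to_fill (length : Int) : Int :=
  let ways := [1, 1, 1, 1] ++ List.replicate (length - 3).toNat 0
  let ways := (PySem.List.pyRange 4 (length + 1) 1).foldl (fun ws i =>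
      let ws := PySem.List.pySetD ws i (PySem.List.pyGetD ws i 0 + PySem.List.pyGetD ws (i - 1) 0)
      let ws := PySem.List.pySetD ws i (PySem.List.pyGetD ws i 0 + PySem.List.pyGetD ws (i - 4) 0)
      (PySem.List.pyRange 0 (i - 4) 1).foldl (fun w j =>
        PySem.List.pySetD w i (PySem.List.pyGetD w i 0 + PySem.List.pyGetD w j 0)) ws) ways
  PySem.List.pyGetD ways length 0

-- ===== PORT B =====
def ways_to_fill_alt (length : Int) : Int :=
  if length < 4 then 1
  else
    let st := (PySem.List.pyRange 4 (length + 1) 1).foldl (fun (st : List Int × Int) i =>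
        let ws := st.1 ++ [PySem.List.pyGetD st.1 (-1) 0 + st.2]
        (ws, st.2 + PySem.List.pyGetD ws (i - 3) 0)) ([1, 1, 1, 1], 1)
    PySem.List.pyGetD st.1 length 0

-- ===== PRECONDITION & SPEC =====
-- Pre_ is exactly the inputs on which A returns normally: for any smaller length A raises IndexError (ways[length] out of range).
def Pre_ways_to_fill (length : Int) : Prop := -4 ≤ length
instance (length : Int) : Decidable (Pre_ways_to_fill length) := by unfold Pre_ways_to_fill; infer_instance
def pvWitness_ways_to_fill : Int := (7)

def Spec_ways_to_fill (length : Int) (out : Int) : Prop := out = ways_to_fill_alt length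
instance (length : Int) (out : Int) : Decidable (Spec_ways_to_fill length out) := by unfold Spec_ways_to_fill; infer_instance

-- ===== CLAIM (what is proved, stated in full; the proofs are below) =====
def Claim_equal_ways_to_fill : Prop := ∀ (length : Int), Dom_ways_to_fill length → Pre_ways_to_fill length → Spec_ways_to_fill length (ways_to_fill length)

-- ===== LEMMAS AND PROOFS =====

-- the loop bodies of the two ports, named for the proofs
def fA : List Int → Int → List Int := fun ws i =>
  let ws := PySem.List.pySetD ws i (PySem.List.pyGetD ws i 0 + PySem.List.pyGetD ws (i - 1) 0)
  let ws := PySem.List.pySetD ws i (PySem.List.pyGetD ws i 0 + PySem.List.pyGetD ws (i - 4) 0)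
  (PySem.List.pyRange 0 (i - 4) 1).foldl (fun w j =>
    PySem.List.pySetD w i (PySem.List.pyGetD w i 0 + PySem.List.pyGetD w j 0)) ws

def fB : List Int × Int → Int → List Int × Int := fun st i =>
  let ws := st.1 ++ [PySem.List.pyGetD st.1 (-1) 0 + st.2]
  (ws, st.2 + PySem.List.pyGetD ws (i - 3) 0)

theorem portA_eq (length : Int) : ways_to_fill length =
    PySem.List.pyGetD ((PySem.List.pyRange 4 (length + 1) 1).foldl fA
      ([1, 1, 1, 1] ++ List.replicate (length - 3).toNat 0)) length 0 := rfl

theorem portB_eq (length : Int) : ways_to_fill_alt length =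
    if length < 4 then 1
    else PySem.List.pyGetD ((PySem.List.pyRange 4 (length + 1) 1).foldl fB ([1, 1, 1, 1], 1)).1 length 0 := rfl

-- the true table of values ways[0..m+3]
def tbl : Nat → List Int
  | 0 => [1, 1, 1, 1]
  | m + 1 => tbl m ++ [PySem.List.pyGetD (tbl m) (-1) 0 + ((tbl m).take (m + 1)).sum]

theorem tbl_length (m : Nat) : (tbl m).length = m + 4 := by
  induction m with
  | zero => rfl
  | succ m ih => simp [tbl, ih]

-- A's inner loop: it adds ws[0] + ... + ws[m-1] onto position i (all reads below the write)
theorem innerA (ws : List Int) (i m : Nat) (hmi : m ≤ i) (hil : i < ws.length) :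
    (PySem.List.pyRange 0 (m : Int) 1).foldl (fun w j =>
        PySem.List.pySetD w (i : Int) (PySem.List.pyGetD w (i : Int) 0 + PySem.List.pyGetD w j 0)) ws
    = ws.set i (ws.getD i 0 + ((ws.take m).sum)) := by
  induction m with
  | zero =>
      rw [PySem.List.pyRange_one_eq_nil (by omega)]
      simp only [List.foldl_nil, List.take_zero, List.sum_nil, add_zero]
      rw [List.getD_eq_getElem _ 0 hil]
      exact (List.set_getElem_self (by simpa using hil)).symm
  | succ m ih =>
      have hc : ((m + 1 : Nat) : Int) = ((m : Nat) : Int) + 1 := by push_cast; ring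
      rw [hc, PySem.List.pyRange_one_succ_right (by omega), List.foldl_append,
        ih (by omega)]
      simp only [List.foldl_cons, List.foldl_nil, PySem.List.pySetD_natCast,
        PySem.List.pyGetD_natCast]
      have hm : m < ws.length := by omega
      set V := ws.getD i 0 + ((ws.take m).sum) with hV
      have h1 : (ws.set i V).getD i 0 = V := by
        rw [List.getD_eq_getElem _ 0 (by simpa using hil)]
        exact List.getElem_set_self (by simpa using hil)
      have h2 : (ws.set i V).getD (m : Nat) 0 = ws.getD m 0 := by
        rw [List.getD_eq_getElem _ 0 (by simpa using hm),
          List.getElem_set_ne (by omega), List.getD_eq_getElem _ 0 hm]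
      rw [h1, h2, List.set_set]
      congr 1
      rw [List.sum_take_succ _ m hm, hV, List.getD_eq_getElem _ 0 hm]
      ring

theorem tbl_getD_last (m : Nat) :
    (tbl m).getD (m + 3) 0 = PySem.List.pyGetD (tbl m) (-1) 0 := by
  have hlm := tbl_length m
  have hne : tbl m ≠ [] := by intro h; rw [h] at hlm; simp at hlm
  rw [PySem.List.pyGetD_neg_one _ _ hne, List.getLast_eq_getElem,
    List.getD_eq_getElem _ 0 (by omega)]
  congr 1
  omega

-- one iteration of A's outer loop, on the true table followed by k+1 zeros
theorem stepA_char (m k : Nat) :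
    fA (tbl m ++ List.replicate (k + 1) 0) ((m + 4 : Nat) : Int)
      = tbl (m + 1) ++ List.replicate k 0 := by
  have hlen := tbl_length m
  have e1 : ((m + 4 : Nat) : Int) - 1 = ((m + 3 : Nat) : Int) := by push_cast; ring
  have e4 : ((m + 4 : Nat) : Int) - 4 = ((m : Nat) : Int) := by push_cast; ring
  have hrep : List.replicate (k + 1) (0 : Int) = 0 :: List.replicate k 0 := rfl
  simp only [fA]
  rw [e1, e4, hrep]
  rw [innerA _ (m + 4) m (by omega)
    (by simp only [PySem.List.length_pySetD, List.length_append, List.length_cons,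
          List.length_replicate, hlen]; omega)]
  simp only [PySem.List.pySetD_natCast, PySem.List.pyGetD_natCast]
  -- first assignment
  have g1 : (tbl m ++ 0 :: List.replicate k (0 : Int)).getD (m + 4) 0 = 0 := by
    rw [List.getD_eq_getElem _ 0 (by simp [hlen]),
      List.getElem_append_right (by omega)]
    simp [hlen]
  have g2 : (tbl m ++ 0 :: List.replicate k (0 : Int)).getD (m + 3) 0
      = (tbl m).getD (m + 3) 0 := by
    rw [List.getD_eq_getElem _ 0 (by simp [hlen]; omega),
      List.getElem_append_left (by omega), List.getD_eq_getElem _ 0 (by omega)]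
  have s1 : (tbl m ++ 0 :: List.replicate k (0 : Int)).set (m + 4)
        (0 + (tbl m).getD (m + 3) 0)
      = tbl m ++ (0 + (tbl m).getD (m + 3) 0) :: List.replicate k 0 := by
    rw [List.set_append_right _ _ (by omega)]
    simp [hlen]
  rw [g1, g2, s1]
  -- second assignment
  set c1 : Int := 0 + (tbl m).getD (m + 3) 0 with hc1
  have g3 : (tbl m ++ c1 :: List.replicate k (0 : Int)).getD (m + 4) 0 = c1 := by
    rw [List.getD_eq_getElem _ 0 (by simp [hlen]),
      List.getElem_append_right (by omega)]
    simp [hlen]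
  have g4 : (tbl m ++ c1 :: List.replicate k (0 : Int)).getD m 0 = (tbl m).getD m 0 := by
    rw [List.getD_eq_getElem _ 0 (by simp [hlen]; omega),
      List.getElem_append_left (by omega), List.getD_eq_getElem _ 0 (by omega)]
  have s2 : (tbl m ++ c1 :: List.replicate k (0 : Int)).set (m + 4)
        (c1 + (tbl m).getD m 0)
      = tbl m ++ (c1 + (tbl m).getD m 0) :: List.replicate k 0 := by
    rw [List.set_append_right _ _ (by omega)]
    simp [hlen]
  rw [g3, g4, s2]
  -- inner loop result
  set c2 : Int := c1 + (tbl m).getD m 0 with hc2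
  have g5 : (tbl m ++ c2 :: List.replicate k (0 : Int)).getD (m + 4) 0 = c2 := by
    rw [List.getD_eq_getElem _ 0 (by simp [hlen]),
      List.getElem_append_right (by omega)]
    simp [hlen]
  have t5 : (tbl m ++ c2 :: List.replicate k (0 : Int)).take m = (tbl m).take m := by
    rw [List.take_append_of_le_length (by omega)]
  have s3 : (tbl m ++ c2 :: List.replicate k (0 : Int)).set (m + 4)
        (c2 + ((tbl m).take m).sum)
      = tbl m ++ (c2 + ((tbl m).take m).sum) :: List.replicate k 0 := by
    rw [List.set_append_right _ _ (by omega)]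
    simp [hlen]
  rw [g5, t5, s3]
  have hval : c2 + ((tbl m).take m).sum
      = PySem.List.pyGetD (tbl m) (-1) 0 + ((tbl m).take (m + 1)).sum := by
    rw [hc2, hc1, List.sum_take_succ _ m (by omega), tbl_getD_last,
      List.getD_eq_getElem _ 0 (by omega)]
    ring
  rw [hval]
  simp [tbl]

theorem loopA (N m : Nat) (h : m ≤ N) :
    (PySem.List.pyRange 4 (4 + (m : Int)) 1).foldl fA (tbl 0 ++ List.replicate N 0)
      = tbl m ++ List.replicate (N - m) 0 := by
  induction m with
  | zero =>
      rw [PySem.List.pyRange_one_eq_nil (by omega)]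
      simp
  | succ m ih =>
      have hc : (4 : Int) + ((m + 1 : Nat) : Int) = (4 + (m : Nat)) + 1 := by
        push_cast; ring
      rw [hc, PySem.List.pyRange_one_succ_right (by omega), List.foldl_append,
        ih (by omega)]
      simp only [List.foldl_cons, List.foldl_nil]
      have e : (4 : Int) + ((m : Nat) : Int) = ((m + 4 : Nat) : Int) := by push_cast; ring
      have hk : N - m = (N - (m + 1)) + 1 := by omega
      rw [e, hk, stepA_char]

theorem loopB (m : Nat) :
    (PySem.List.pyRange 4 (4 + (m : Int)) 1).foldl fB ([1, 1, 1, 1], 1)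
      = (tbl m, ((tbl m).take (m + 1)).sum) := by
  induction m with
  | zero =>
      rw [PySem.List.pyRange_one_eq_nil (by omega)]
      simp [tbl]
  | succ m ih =>
      have hc : (4 : Int) + ((m + 1 : Nat) : Int) = (4 + (m : Nat)) + 1 := by
        push_cast; ring
      rw [hc, PySem.List.pyRange_one_succ_right (by omega), List.foldl_append, ih]
      simp only [List.foldl_cons, List.foldl_nil, fB]
      have e3 : (4 : Int) + ((m : Nat) : Int) - 3 = ((m + 1 : Nat) : Int) := by
        push_cast; ring
      have hws : tbl m ++ [PySem.List.pyGetD (tbl m) (-1) 0 + ((tbl m).take (m + 1)).sum]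
          = tbl (m + 1) := rfl
      simp only [e3, hws, PySem.List.pyGetD_natCast]
      refine Prod.ext rfl ?_
      show ((tbl m).take (m + 1)).sum + (tbl (m + 1)).getD (m + 1) 0
        = ((tbl (m + 1)).take (m + 2)).sum
      have hlen := tbl_length m
      have hlen1 := tbl_length (m + 1)
      rw [List.getD_eq_getElem _ 0 (by omega), List.sum_take_succ _ (m + 1) (by omega)]
      congr 1
      show ((tbl m).take (m + 1)).sum = ((tbl m ++ [_]).take (m + 1)).sum
      rw [List.take_append_of_le_length (by omega)]

-- ===== VERDICT (by name: the statement is the Claim_ definition above) =====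
theorem ways_to_fill_spec : Claim_equal_ways_to_fill := by
  intro length _ hpre
  unfold Spec_ways_to_fill
  unfold Pre_ways_to_fill at hpre
  by_cases hl : length < 4
  · interval_cases length <;> decide
  · rw [not_lt] at hl
    set N : Nat := (length - 3).toNat with hN
    have hNl : (N : Int) = length - 3 := by omega
    rw [portA_eq, portB_eq, if_neg (by omega)]
    have hr : length + 1 = 4 + (N : Int) := by omega
    have hinit : ([1, 1, 1, 1] ++ List.replicate (length - 3).toNat (0 : Int))
        = tbl 0 ++ List.replicate N 0 := rfl
    rw [hr, hinit, loopA N N le_rfl, loopB N]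
    simp
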